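-- pv_equiv track=rewrite | github.com/GodfredAsa/python_scripting | DSA/sliding_window/sliding_window.py | getLongestSubstring
-- ===== SOURCE A (Python) =====
-- def getLongestSubstring(s):
--     vowels = ['a', 'e', 'i', 'o', 'u']
--     result = ""
--     maxResult = ""
--     for i in range(len(s)):
--         if s[i] not in vowels:
--             result += s[i]
--             if len(result) > len(maxResult):
--                 maxResult = result
--         else:
--             result = ""
--
--     return len(maxResult)
-- ===== SOURCE B (Python) =====
-- def getLongestSubstring(s):
--     # gap method: collect all vowel positions, then the answer is the largest
--     # gap between consecutive vowel positions (with sentinels -1 and len(s)).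
--     vowel_pos = [i for i, c in enumerate(s) if c in 'aeiou']
--     bounds = vowel_pos + [len(s)]
--     gaps = []
--     prev = -1
--     for b in bounds:
--         gaps.append(b - prev - 1)
--         prev = b
--     return max(gaps)
-- ===== Notes on version B (the rewrite author's own statement) =====
-- stated objective: alternative
-- what changed: B first collects the list of vowel positions and then takes the maximum gap between consecutive positions (with sentinels -1 and len(s)), instead of A's single streaming pass that accumulates the current run as a string and keeps a running-max copy.
import Mathlib
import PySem

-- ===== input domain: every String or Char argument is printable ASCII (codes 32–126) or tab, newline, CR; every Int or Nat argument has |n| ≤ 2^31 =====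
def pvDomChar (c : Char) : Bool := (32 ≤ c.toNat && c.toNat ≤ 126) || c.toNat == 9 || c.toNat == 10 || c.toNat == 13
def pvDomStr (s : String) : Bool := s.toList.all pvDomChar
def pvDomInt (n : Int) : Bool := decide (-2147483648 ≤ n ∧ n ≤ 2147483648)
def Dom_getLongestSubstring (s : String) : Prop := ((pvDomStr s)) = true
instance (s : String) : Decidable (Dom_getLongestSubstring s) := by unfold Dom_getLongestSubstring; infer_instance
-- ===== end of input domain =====

-- B collects the vowel positions and returns the largest gap between consecutive positions (with sentinels -1 and len(s)), instead of A's streaming run that accumulates substring copies with a running max (alternative decomposition: build positions, then reduce over gaps).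


-- ===== PORT A =====
-- A's loop state: (result, maxResult), both strings kept as List Char
def pvStepA (p : List Char × List Char) (c : Char) : List Char × List Char :=
  if ¬ (['a','e','i','o','u'].contains c) then
    let result := p.1 ++ [c]
    if result.length > p.2.length then (result, result) else (result, p.2)
  else ([], p.2)

def getLongestSubstring (s : String) : Int :=
  let st := s.toList.foldl pvStepA ([], [])
  (st.2.length : Int)

-- ===== PORT B =====
def getLongestSubstring_alt (s : String) : Int :=
  -- vowel_pos = [i for i, c in enumerate(s) if c in 'aeiou']
  let pos := ((PySem.List.enumerate s.toList 0).filter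
      (fun p => ['a','e','i','o','u'].contains p.2)).map (fun p => p.1)
  -- bounds = vowel_pos + [len(s)]
  let bounds := pos ++ [(s.toList.length : Int)]
  -- the gaps loop, state (gaps, prev)
  let st := bounds.foldl (fun (q : List Int × Int) b => (q.1 ++ [b - q.2 - 1], b))
      (([] : List Int), -1)
  -- max(gaps); bounds (hence gaps) is always nonempty, so Python's max is defined
  (PySem.List.max? st.1 (fun x => x)).getD 0

-- ===== PRECONDITION & SPEC =====
def Spec_getLongestSubstring (s : String) (out : Int) : Prop := out = getLongestSubstring_alt s
instance (s : String) (out : Int) : Decidable (Spec_getLongestSubstring s out) := by unfold Spec_getLongestSubstring; infer_instance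

-- ===== CLAIM (what is proved, stated in full; the proofs are below) =====
def Claim_equal_getLongestSubstring : Prop := ∀ (s : String), Dom_getLongestSubstring s → Spec_getLongestSubstring s (getLongestSubstring s)

-- ===== LEMMAS AND PROOFS =====

-- reference run-length machine used only inside the proof: state (runs, cur)
def pvStepR (p : List Int × Int) (c : Char) : List Int × Int :=
  if ['a','e','i','o','u'].contains c then (p.1 ++ [p.2], 0) else (p.1, p.2 + 1)

-- consecutive differences of a boundary list
def pvDiffs : Int → List Int → List Int
  | _, [] => []
  | prev, x :: xs => (x - prev - 1) :: pvDiffs x xs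

-- vowel positions of l, indexed from i (definitionally B's list comprehension)
def pvPos (i : Int) (l : List Char) : List Int :=
  ((PySem.List.enumerate l i).filter (fun p => ['a','e','i','o','u'].contains p.2)).map
    (fun p => p.1)

lemma pvPos_nil (i : Int) : pvPos i [] = [] := by
  simp [pvPos, PySem.List.enumerate_nil]

lemma pvPos_cons (i : Int) (c : Char) (t : List Char) :
    pvPos i (c :: t) =
      if ['a','e','i','o','u'].contains c then i :: pvPos (i+1) t else pvPos (i+1) t := by
  by_cases h : c = 'a' ∨ c = 'e' ∨ c = 'i' ∨ c = 'o' ∨ c = 'u'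
  · simp [pvPos, PySem.List.enumerate_cons, h]
  · simp [pvPos, PySem.List.enumerate_cons, h]

-- the gaps foldl accumulates exactly pvDiffs
lemma pv_foldl_diffs : ∀ (bs : List Int) (acc : List Int) (prev : Int),
    (bs.foldl (fun (q : List Int × Int) b => (q.1 ++ [b - q.2 - 1], b)) (acc, prev)).1
      = acc ++ pvDiffs prev bs := by
  intro bs
  induction bs with
  | nil => intro acc prev; simp [pvDiffs]
  | cons b t ih => intro acc prev; simp [pvDiffs, List.foldl_cons, ih]

-- the run machine's accumulated-run list is a prefix accumulator
lemma pvStepR_acc : ∀ (l : List Char) (a : List Int) (cur : Int),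
    l.foldl pvStepR (a, cur)
      = (a ++ (l.foldl pvStepR ([], cur)).1, (l.foldl pvStepR ([], cur)).2) := by
  intro l
  induction l with
  | nil => intro a cur; simp
  | cons c t ih =>
    intro a cur
    simp only [List.foldl_cons, pvStepR]
    by_cases h : (['a','e','i','o','u'].contains c) = true
    · simp only [h, if_true, List.nil_append]
      rw [ih (a ++ [cur]) 0, ih [cur] 0]
      simp
    · simp only [eq_false_of_ne_true h, Bool.false_eq_true, if_false]
      exact ih a (cur + 1)

-- boundary gaps = run lengths
lemma pv_gaps_runs : ∀ (l : List Char) (i prev : Int),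
    pvDiffs prev (pvPos i l ++ [i + (l.length : Int)])
      = (l.foldl pvStepR ([], i - prev - 1)).1 ++ [(l.foldl pvStepR ([], i - prev - 1)).2] := by
  intro l
  induction l with
  | nil => intro i prev; simp [pvPos_nil, pvDiffs]
  | cons c t ih =>
    intro i prev
    rw [pvPos_cons]
    by_cases h : (['a','e','i','o','u'].contains c) = true
    · have hacc := pvStepR_acc t [i - prev - 1] 0
      have ht := ih (i + 1) i
      have h0 : i + 1 - i - 1 = (0 : Int) := by ring
      rw [h0] at ht
      have hlen : i + ((c :: t).length : Int) = (i + 1) + (t.length : Int) := by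
        simp only [List.length_cons]; push_cast; ring
      simp only [h, if_true, List.cons_append, pvDiffs, List.foldl_cons, pvStepR,
        List.nil_append]
      rw [hlen, ht, hacc]
      simp
    · have ht := ih (i + 1) prev
      have h0 : i + 1 - prev - 1 = i - prev - 1 + 1 := by ring
      rw [h0] at ht
      have hlen : i + ((c :: t).length : Int) = (i + 1) + (t.length : Int) := by
        simp only [List.length_cons]; push_cast; ring
      simp only [eq_false_of_ne_true h, Bool.false_eq_true, if_false, List.foldl_cons,
        pvStepR]
      rw [hlen]
      exact ht

-- all run lengths are nonnegative when the counter starts nonnegative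
lemma pvStepR_nonneg : ∀ (l : List Char) (cur : Int), 0 ≤ cur →
    (∀ x ∈ (l.foldl pvStepR ([], cur)).1, 0 ≤ x) ∧ 0 ≤ (l.foldl pvStepR ([], cur)).2 := by
  intro l
  induction l with
  | nil => intro cur h; simp [h]
  | cons c t ih =>
    intro cur h
    simp only [List.foldl_cons, pvStepR]
    by_cases hv : (['a','e','i','o','u'].contains c) = true
    · simp only [hv, if_true, List.nil_append]
      rw [pvStepR_acc t [cur] 0]
      have := ih 0 le_rfl
      refine ⟨?_, by simpa using this.2⟩
      intro x hx
      simp only [List.mem_append, List.mem_singleton] at hx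
      rcases hx with hx | hx
      · omega
      · exact this.1 x hx
    · simp only [eq_false_of_ne_true hv, Bool.false_eq_true, if_false]
      exact ih (cur + 1) (by omega)

-- Python max of a nonempty all-nonnegative list is the running max from 0
lemma pv_max_getD : ∀ (xs : List Int), xs ≠ [] → (∀ x ∈ xs, 0 ≤ x) →
    (PySem.List.max? xs (fun x => x)).getD 0 = xs.foldl max 0 := by
  intro xs hne hnn
  cases xs with
  | nil => exact absurd rfl hne
  | cons x t =>
    rw [PySem.List.max?_id_cons]
    have hx : 0 ≤ x := hnn x (List.mem_cons_self)
    simp [List.foldl_cons, max_eq_right hx]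

-- A's value equals the running max of the run machine's output
lemma pv_key : ∀ (l : List Char) (res mx : List Char) (runs : List Int) (cur : Int),
    cur = (res.length : Int) →
    (mx.length : Int) = max (runs.foldl max 0) cur →
    ((l.foldl pvStepA (res, mx)).2.length : Int)
      = (let st := l.foldl pvStepR (runs, cur); (st.1 ++ [st.2]).foldl max 0) := by
  intro l
  induction l with
  | nil =>
    intro res mx runs cur h1 h2
    simp [List.foldl_append, h2]
  | cons c t ih =>
    intro res mx runs cur h1 h2
    simp only [List.foldl_cons, pvStepA, pvStepR]
    by_cases hv : (['a','e','i','o','u'].contains c) = true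
    · simp only [hv, not_true_eq_false, if_false, if_true]
      apply ih
      · simp
      · have hmx : (0:Int) ≤ (mx.length : Int) := by positivity
        simp only [List.foldl_append, List.foldl_cons, List.foldl_nil]
        omega
    · simp only [eq_false_of_ne_true hv]
      by_cases hgt : (res ++ [c]).length > mx.length
      · simp only [if_pos hgt]
        apply ih
        · simp [h1]
        · simp only [List.length_append, List.length_cons, List.length_nil] at hgt ⊢
          omega
      · simp only [if_neg hgt]
        apply ih
        · simp [h1]
        · simp only [List.length_append, List.length_cons, List.length_nil] at hgt ⊢
          omega

-- the whole equivalence on the char list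
lemma pv_main (l : List Char) :
    ((l.foldl pvStepA ([], [])).2.length : Int)
      = (PySem.List.max?
          ((pvPos 0 l ++ [(l.length : Int)]).foldl
            (fun (q : List Int × Int) b => (q.1 ++ [b - q.2 - 1], b))
            (([] : List Int), -1)).1 (fun x => x)).getD 0 := by
  rw [pv_foldl_diffs, List.nil_append]
  have hg := pv_gaps_runs l 0 (-1)
  have h0 : (0:Int) - (-1) - 1 = 0 := by ring
  rw [h0] at hg
  simp only [zero_add] at hg
  rw [hg]
  have hnn := pvStepR_nonneg l 0 le_rfl
  have hnn' : ∀ x ∈ ((l.foldl pvStepR ([], 0)).1 ++ [(l.foldl pvStepR ([], 0)).2]), 0 ≤ x := by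
    intro x hx
    simp only [List.mem_append, List.mem_singleton] at hx
    rcases hx with hx | hx
    · exact hnn.1 x hx
    · omega
  rw [pv_max_getD _ (by simp) hnn']
  exact pv_key l [] [] [] 0 (by simp) (by simp)

-- ===== VERDICT (by name: the statement is the Claim_ definition above) =====
theorem getLongestSubstring_spec : Claim_equal_getLongestSubstring := by
  intro s _
  unfold Spec_getLongestSubstring getLongestSubstring getLongestSubstring_alt
  exact pv_main s.toList
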